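-- pv_equiv track=rewrite | github.com/kanglicheng/codefights | InterviewPractice/CommonTechniques/ProductExceptItself.py | productExceptSelf
-- ===== SOURCE A (Python) =====
-- def productExceptSelf(nums, m):
--     preProd = [1 for x in range(len(nums))]
--     sufProd = [1 for x in range(len(nums))]
--
--     for i in range(1, len(nums)):
--         preProd[i] = (preProd[i - 1] * nums[i - 1]) % m
--
--     for j in range(len(nums) - 1, 0, -1):
--         sufProd[j - 1] = (sufProd[j] * nums[j]) % m
--
--     total = 0
--
--     for i in range(len(nums)):
--         total += (preProd[i] * sufProd[i]) % m
--
--     return total % m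
-- ===== SOURCE B (Python) =====
-- def productExceptSelf(nums, m):
--     total = 0
--     for i in range(len(nums)):
--         p = 1
--         for j in range(len(nums)):
--             if j != i:
--                 p = (p * nums[j]) % m
--         total += p % m
--     return total % m
-- ===== Notes on version B (the rewrite author's own statement) =====
-- stated objective: alternative
-- what changed: Replaces A's prefix-product and suffix-product arrays with a direct per-index scan: for each index, multiply all the other elements together (reducing mod m as it goes) and add that one residue; correct because Python's % respects products, so A's combined prefix- and suffix-chained mods equal the mod of the plain product without index i.
-- outside the precondition, e.g. on productExceptSelf([1, 2, 3], 0): A raises ZeroDivisionError, B raises ZeroDivisionError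
import Mathlib
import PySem

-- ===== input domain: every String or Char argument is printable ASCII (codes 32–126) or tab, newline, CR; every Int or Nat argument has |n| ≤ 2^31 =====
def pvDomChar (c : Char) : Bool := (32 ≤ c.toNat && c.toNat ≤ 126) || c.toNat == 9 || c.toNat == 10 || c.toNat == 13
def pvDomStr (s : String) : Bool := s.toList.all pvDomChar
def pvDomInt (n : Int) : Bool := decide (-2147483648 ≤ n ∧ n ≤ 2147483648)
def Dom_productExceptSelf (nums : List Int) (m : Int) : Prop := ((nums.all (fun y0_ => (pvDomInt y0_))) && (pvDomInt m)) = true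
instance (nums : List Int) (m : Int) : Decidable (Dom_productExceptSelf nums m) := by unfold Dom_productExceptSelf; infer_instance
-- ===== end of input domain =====

-- B drops A's prefix/suffix arrays: for each index it multiplies all the other
-- elements directly, reducing mod m as it goes (objective: alternative — Python's
-- % respects products, so per-term this equals A's combined chained mods).

-- ===== PORT A =====
def productExceptSelf (nums : List Int) (m : Int) : Int :=
  let n : Int := PySem.List.len nums
  let preProd : List Int := (PySem.List.pyRange 0 n 1).map (fun _ => (1 : Int))
  let sufProd : List Int := (PySem.List.pyRange 0 n 1).map (fun _ => (1 : Int))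
  let preProd := (PySem.List.pyRange 1 n 1).foldl
    (fun pre i => PySem.List.pySetD pre i
      (PySem.Int.mod (PySem.List.pyGetD pre (i - 1) 1 * PySem.List.pyGetD nums (i - 1) 1) m)) preProd
  let sufProd := (PySem.List.pyRange (n - 1) 0 (-1)).foldl
    (fun suf j => PySem.List.pySetD suf (j - 1)
      (PySem.Int.mod (PySem.List.pyGetD suf j 1 * PySem.List.pyGetD nums j 1) m)) sufProd
  let total : Int := (PySem.List.pyRange 0 n 1).foldl
    (fun t i => t + PySem.Int.mod (PySem.List.pyGetD preProd i 1 * PySem.List.pyGetD sufProd i 1) m) 0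
  PySem.Int.mod total m

-- ===== PORT B =====
def productExceptSelf_alt (nums : List Int) (m : Int) : Int :=
  let n : Int := PySem.List.len nums
  let total : Int := (PySem.List.pyRange 0 n 1).foldl
    (fun t i =>
      let p : Int := (PySem.List.pyRange 0 n 1).foldl
        (fun p j => if j ≠ i then PySem.Int.mod (p * PySem.List.pyGetD nums j 1) m else p) 1
      t + PySem.Int.mod p m) 0
  PySem.Int.mod total m

-- ===== PRECONDITION & SPEC =====
-- Pre_ excludes m = 0, on which Python's '%' raises ZeroDivisionError in both A and B.
def Pre_productExceptSelf (nums : List Int) (m : Int) : Prop := m ≠ 0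
instance (nums : List Int) (m : Int) : Decidable (Pre_productExceptSelf nums m) := by unfold Pre_productExceptSelf; infer_instance
def pvWitness_productExceptSelf : List Int × Int := ([1, 2, 3], 5)
def Spec_productExceptSelf (nums : List Int) (m : Int) (out : Int) : Prop := out = productExceptSelf_alt nums m
instance (nums : List Int) (m : Int) (out : Int) : Decidable (Spec_productExceptSelf nums m out) := by unfold Spec_productExceptSelf; infer_instance

-- ===== CLAIM (what is proved, stated in full; the proofs are below) =====
def Claim_equal_productExceptSelf : Prop := ∀ (nums : List Int) (m : Int), Dom_productExceptSelf nums m → Pre_productExceptSelf nums m → Spec_productExceptSelf nums m (productExceptSelf nums m)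

-- ===== LEMMAS AND PROOFS =====

-- Python mod is congruent modulo the divisor, and determined by the residue class (b ≠ 0).
theorem pymod_dvd_sub (a b : Int) : b ∣ PySem.Int.mod a b - a := by
  have h := PySem.Int.floordiv_mul_add_mod a b
  exact ⟨-PySem.Int.floordiv a b, by linarith [h]⟩

theorem pymod_congr {b : Int} (hb : b ≠ 0) {a a' : Int} (h : b ∣ a - a') :
    PySem.Int.mod a b = PySem.Int.mod a' b := by
  have h1 := pymod_dvd_sub a b
  have h2 := pymod_dvd_sub a' b
  have hd : b ∣ PySem.Int.mod a b - PySem.Int.mod a' b := by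
    have : PySem.Int.mod a b - PySem.Int.mod a' b
        = (PySem.Int.mod a b - a) - (PySem.Int.mod a' b - a') + (a - a') := by ring
    rw [this]; exact dvd_add (dvd_sub h1 h2) h
  rcases lt_trichotomy b 0 with hneg | hz | hpos
  · have b1 := PySem.Int.mod_neg_bounds a hneg
    have b2 := PySem.Int.mod_neg_bounds a' hneg
    have hd' : (-b) ∣ PySem.Int.mod a b - PySem.Int.mod a' b := (neg_dvd).mpr hd
    have := Int.eq_zero_of_abs_lt_dvd hd' (by rw [abs_lt]; constructor <;> omega)
    omega
  · exact absurd hz hb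
  · have b1l := PySem.Int.mod_nonneg a hpos
    have b1h := PySem.Int.mod_lt a hpos
    have b2l := PySem.Int.mod_nonneg a' hpos
    have b2h := PySem.Int.mod_lt a' hpos
    have := Int.eq_zero_of_abs_lt_dvd hd (by rw [abs_lt]; constructor <;> omega)
    omega

-- chained-mod prefix product (A's preProd[i] is gpre m (nums.take i))
def gpre (m : Int) (l : List Int) : Int := l.foldl (fun a x => PySem.Int.mod (a * x) m) 1

-- chained-mod suffix product (A's sufProd[i] is gsuf m (nums.drop (i+1)))
def gsuf (m : Int) : List Int → Int
  | [] => 1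
  | x :: l => PySem.Int.mod (gsuf m l * x) m

theorem gpre_dvd_aux (m : Int) (l : List Int) (a0 : Int) :
    m ∣ l.foldl (fun a x => PySem.Int.mod (a * x) m) a0 - a0 * l.prod := by
  induction l generalizing a0 with
  | nil => simp
  | cons x l ih =>
    simp only [List.foldl_cons, List.prod_cons]
    have h1 := ih (PySem.Int.mod (a0 * x) m)
    have h2 := pymod_dvd_sub (a0 * x) m
    have : l.foldl (fun a x => PySem.Int.mod (a * x) m) (PySem.Int.mod (a0 * x) m) - a0 * (x * l.prod)
        = (l.foldl (fun a x => PySem.Int.mod (a * x) m) (PySem.Int.mod (a0 * x) m)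
            - PySem.Int.mod (a0 * x) m * l.prod)
          + l.prod * (PySem.Int.mod (a0 * x) m - a0 * x) := by ring
    rw [this]
    exact dvd_add h1 (Dvd.dvd.mul_left h2 l.prod)

theorem gpre_dvd (m : Int) (l : List Int) : m ∣ gpre m l - l.prod := by
  have := gpre_dvd_aux m l 1; simpa [gpre] using this

theorem gsuf_dvd (m : Int) (l : List Int) : m ∣ gsuf m l - l.prod := by
  induction l with
  | nil => simp [gsuf]
  | cons x l ih =>
    simp only [gsuf, List.prod_cons]
    have h2 := pymod_dvd_sub (gsuf m l * x) m
    have : PySem.Int.mod (gsuf m l * x) m - x * l.prod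
        = (PySem.Int.mod (gsuf m l * x) m - gsuf m l * x) + x * (gsuf m l - l.prod) := by ring
    rw [this]
    exact dvd_add h2 (Dvd.dvd.mul_left ih x)

theorem gsuf_drop (nums : List Int) (m : Int) (k : Nat) (hk : k < nums.length) :
    gsuf m (nums.drop k) = PySem.Int.mod (gsuf m (nums.drop (k + 1)) * nums.getD k 1) m := by
  rw [List.drop_eq_getElem_cons hk, gsuf, List.getD_eq_getElem _ _ hk]

-- A's suffix loop: after the whole loop, cell i holds gsuf m (nums.drop (i+1)).
theorem sufLoop_getD (nums : List Int) (m : Int) (k : Nat) (hk : (k : Int) ≤ (nums.length : Int) - 1)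
    (arr : List Int) (hlen : arr.length = nums.length)
    (hinv : ∀ i : Nat, i < nums.length → arr.getD i 1 =
      if k ≤ i then gsuf m (nums.drop (i + 1)) else 1) :
    ∀ i : Nat, i < nums.length →
      ((PySem.List.pyRange (k : Int) 0 (-1)).foldl
        (fun suf j => PySem.List.pySetD suf (j - 1)
          (PySem.Int.mod (PySem.List.pyGetD suf j 1 * PySem.List.pyGetD nums j 1) m)) arr).getD i 1
      = gsuf m (nums.drop (i + 1)) := by
  induction k generalizing arr with
  | zero =>
    rw [PySem.List.pyRange_neg_one_eq_nil (by omega)]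
    intro i hi
    simpa using hinv i hi
  | succ k ih =>
    have hkn : k + 1 < nums.length := by omega
    rw [show ((k + 1 : Nat) : Int) = ((k : Int) + 1) by push_cast; ring] at *
    rw [PySem.List.pyRange_neg_one_cons (by omega)]
    simp only [List.foldl_cons]
    rw [show ((k : Int) + 1 - 1) = ((k : Nat) : Int) by ring]
    apply ih (by omega)
    · simpa [PySem.List.length_pySetD] using hlen
    · intro i hi
      have hget : PySem.List.pyGetD arr ((k : Int) + 1) 1 = gsuf m (nums.drop (k + 1 + 1)) := by
        rw [show ((k : Int) + 1) = ((k + 1 : Nat) : Int) by push_cast; ring,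
            PySem.List.pyGetD_natCast, hinv (k + 1) hkn, if_pos (le_refl _)]
      have hnum : PySem.List.pyGetD nums ((k : Int) + 1) 1 = nums.getD (k + 1) 1 := by
        rw [show ((k : Int) + 1) = ((k + 1 : Nat) : Int) by push_cast; ring,
            PySem.List.pyGetD_natCast]
      rw [PySem.List.pySetD_natCast]
      by_cases hik : i = k
      · subst hik
        rw [List.getD_eq_getElem _ _ (by simp only [List.length_set, hlen]; exact hi)]
        simp only [List.getElem_set_self]
        rw [hget, hnum, if_pos (le_refl _), gsuf_drop nums m (i + 1) hkn]
      · have : (arr.set k (PySem.Int.mod (PySem.List.pyGetD arr ((k : Int) + 1) 1 *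
            PySem.List.pyGetD nums ((k : Int) + 1) 1) m)).getD i 1 = arr.getD i 1 := by
          rcases Nat.lt_or_ge i arr.length with h | h
          · rw [List.getD_eq_getElem _ _ (by simpa using h), List.getD_eq_getElem _ _ h,
                List.getElem_set_ne (by omega)]
          · rw [List.getD_eq_default _ _ (by simpa using h), List.getD_eq_default _ _ h]
        rw [this, hinv i hi]
        by_cases h1 : k ≤ i
        · rw [if_pos h1, if_pos (by omega)]
        · rw [if_neg h1, if_neg (by omega)]

theorem gpre_take_succ (nums : List Int) (m : Int) (k : Nat) (hk : k < nums.length) :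
    gpre m (nums.take (k + 1)) = PySem.Int.mod (gpre m (nums.take k) * nums.getD k 1) m := by
  have ht : nums.take (k + 1) = nums.take k ++ [nums[k]] := by
    rw [List.take_add_one, List.getElem?_eq_getElem hk]; rfl
  unfold gpre
  rw [ht, List.foldl_append, List.foldl_cons, List.foldl_nil, List.getD_eq_getElem _ _ hk]

-- A's prefix loop, truncated at upper bound k: cell i holds gpre m (nums.take i) for i < k.
theorem preLoop_getD (nums : List Int) (m : Int) (k : Nat) (hk : k ≤ nums.length)
    (arr : List Int) :
    ∀ out, out = (PySem.List.pyRange 1 (k : Int) 1).foldl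
        (fun pre i => PySem.List.pySetD pre i
          (PySem.Int.mod (PySem.List.pyGetD pre (i - 1) 1 * PySem.List.pyGetD nums (i - 1) 1) m)) arr →
      arr.length = nums.length →
      (∀ i : Nat, i < nums.length → arr.getD i 1 = 1) →
      out.length = nums.length ∧
      ∀ i : Nat, i < nums.length → out.getD i 1 =
        if i < k ∨ i = 0 then gpre m (nums.take i) else 1 := by
  induction k with
  | zero =>
    intro out hout hlen h1
    rw [PySem.List.pyRange_one_eq_nil (by omega)] at hout
    subst hout
    refine ⟨hlen, fun i hi => ?_⟩
    by_cases h0 : i = 0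
    · subst h0
      rw [if_pos (Or.inr rfl)]
      simp only [List.take_zero, gpre, List.foldl_nil]
      exact h1 0 hi
    · rw [if_neg (by omega), h1 i hi]
  | succ k ih =>
    intro out hout hlen h1
    by_cases hk0 : k = 0
    · subst hk0
      rw [show ((1 : Nat) : Int) = (1 : Int) by norm_num,
          PySem.List.pyRange_one_eq_nil (by omega)] at hout
      subst hout
      refine ⟨hlen, fun i hi => ?_⟩
      by_cases h0 : i = 0
      · subst h0
        rw [if_pos (Or.inr rfl)]
        simp only [List.take_zero, gpre, List.foldl_nil]
        exact h1 0 hi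
      · rw [if_neg (by omega), h1 i hi]
    · have hk1 : (1 : Int) ≤ (k : Int) := by omega
      rw [show ((k + 1 : Nat) : Int) = ((k : Nat) : Int) + 1 by push_cast; ring,
          PySem.List.pyRange_one_succ_right (by omega), List.foldl_append, List.foldl_cons,
          List.foldl_nil] at hout
      obtain ⟨plen, pinv⟩ := ih (by omega) _ rfl hlen h1
      set prev := (PySem.List.pyRange 1 (k : Int) 1).foldl
        (fun pre i => PySem.List.pySetD pre i
          (PySem.Int.mod (PySem.List.pyGetD pre (i - 1) 1 * PySem.List.pyGetD nums (i - 1) 1) m)) arr with hprev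
      have hkn : k < nums.length := by omega
      have hgetp : PySem.List.pyGetD prev ((k : Int) - 1) 1 = gpre m (nums.take (k - 1)) := by
        rw [show ((k : Int) - 1) = ((k - 1 : Nat) : Int) by omega, PySem.List.pyGetD_natCast,
            pinv (k - 1) (by omega)]
        by_cases h0 : k - 1 = 0
        · rw [if_pos (Or.inr h0)]
        · rw [if_pos (Or.inl (by omega))]
      have hgetn : PySem.List.pyGetD nums ((k : Int) - 1) 1 = nums.getD (k - 1) 1 := by
        rw [show ((k : Int) - 1) = ((k - 1 : Nat) : Int) by omega, PySem.List.pyGetD_natCast]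
      rw [PySem.List.pySetD_natCast] at hout
      subst hout
      refine ⟨by simpa using plen, ?_⟩
      intro i hi
      by_cases hik : i = k
      · subst hik
        rw [List.getD_eq_getElem _ _ (by simp only [List.length_set, plen]; exact hi)]
        simp only [List.getElem_set_self]
        rw [hgetp, hgetn, if_pos (Or.inl (by omega))]
        have : i - 1 + 1 = i := by omega
        rw [← this, gpre_take_succ nums m (i - 1) (by omega)]
        simp
      · have hset : ∀ v : Int, ((prev.set k v).getD i 1) = prev.getD i 1 := by
          intro v
          rcases Nat.lt_or_ge i prev.length with h | h
          · rw [List.getD_eq_getElem _ _ (by simpa using h), List.getD_eq_getElem _ _ h,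
                List.getElem_set_ne (by omega)]
          · rw [List.getD_eq_default _ _ (by simpa using h), List.getD_eq_default _ _ h]
        rw [hset, pinv i hi]
        by_cases h1' : i < k ∨ i = 0
        · rw [if_pos h1', if_pos (by omega)]
        · rw [if_neg h1', if_neg (by omega)]

-- B's inner loop, truncated at upper bound k, computes the exact product of
-- nums[0:k] with index i skipped.
theorem innerLoop (nums : List Int) (i : Nat) (k : Nat) (hk : k ≤ nums.length) :
    (PySem.List.pyRange 0 (k : Int) 1).foldl
      (fun p j => if j ≠ (i : Int) then p * PySem.List.pyGetD nums j 1 else p) 1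
    = if k ≤ i then (nums.take k).prod
      else (nums.take i).prod * ((nums.drop (i + 1)).take (k - i - 1)).prod := by
  induction k with
  | zero =>
    rw [PySem.List.pyRange_one_eq_nil (by omega)]
    simp
  | succ k ih =>
    have hkn : k < nums.length := by omega
    rw [show ((k + 1 : Nat) : Int) = ((k : Nat) : Int) + 1 by push_cast; ring,
        PySem.List.pyRange_one_succ_right (by omega), List.foldl_append, List.foldl_cons,
        List.foldl_nil, ih (by omega)]
    have hgn : PySem.List.pyGetD nums ((k : Nat) : Int) 1 = nums.getD k 1 := PySem.List.pyGetD_natCast ..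
    by_cases hik : k = i
    · subst hik
      rw [if_neg (by simp), if_pos (le_refl _), if_neg (by omega)]
      simp
    · rw [if_pos (by exact_mod_cast fun h => hik (by exact_mod_cast h))]
      by_cases hki : k < i
      · rw [if_pos (by omega), if_pos (by omega), hgn]
        have ht : nums.take (k + 1) = nums.take k ++ [nums[k]] := by
          rw [List.take_add_one, List.getElem?_eq_getElem hkn]; rfl
        rw [ht, List.prod_append, List.prod_cons, List.prod_nil, List.getD_eq_getElem _ _ hkn,
            mul_one]
      · have hik' : i < k := by omega
        rw [if_neg (by omega), if_neg (by omega), hgn]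
        have hlt : k - i - 1 < (nums.drop (i + 1)).length := by
          simp only [List.length_drop]; omega
        have ht : (nums.drop (i + 1)).take (k - i - 1 + 1)
            = (nums.drop (i + 1)).take (k - i - 1) ++ [(nums.drop (i + 1))[k - i - 1]] := by
          rw [List.take_add_one, List.getElem?_eq_getElem hlt]; rfl
        have hel : (nums.drop (i + 1))[k - i - 1] = nums.getD k 1 := by
          rw [List.getElem_drop, List.getD_eq_getElem _ _ (by omega)]
          congr 1; omega
        rw [show k + 1 - i - 1 = (k - i - 1) + 1 by omega, ht, hel, List.prod_append,
            List.prod_cons, List.prod_nil, mul_one, mul_assoc]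

-- B's modded inner loop is congruent mod m to the exact product fold.
theorem innerLoop_dvd (nums : List Int) (m : Int) (i : Nat) (k : Nat) :
    m ∣ (PySem.List.pyRange 0 (k : Int) 1).foldl
        (fun p j => if j ≠ (i : Int) then PySem.Int.mod (p * PySem.List.pyGetD nums j 1) m else p) 1
      - (PySem.List.pyRange 0 (k : Int) 1).foldl
        (fun p j => if j ≠ (i : Int) then p * PySem.List.pyGetD nums j 1 else p) 1 := by
  induction k with
  | zero =>
    rw [PySem.List.pyRange_one_eq_nil (by omega)]
    simp
  | succ k ih =>
    rw [show ((k + 1 : Nat) : Int) = ((k : Nat) : Int) + 1 by push_cast; ring,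
        PySem.List.pyRange_one_succ_right (by omega), List.foldl_append, List.foldl_append,
        List.foldl_cons, List.foldl_cons, List.foldl_nil, List.foldl_nil]
    set a := (PySem.List.pyRange 0 (k : Int) 1).foldl
      (fun p j => if j ≠ (i : Int) then PySem.Int.mod (p * PySem.List.pyGetD nums j 1) m else p) 1
    set b := (PySem.List.pyRange 0 (k : Int) 1).foldl
      (fun p j => if j ≠ (i : Int) then p * PySem.List.pyGetD nums j 1 else p) 1
    by_cases hik : ((k : Nat) : Int) ≠ (i : Int)
    · rw [if_pos hik, if_pos hik]
      have h1 := pymod_dvd_sub (a * PySem.List.pyGetD nums ((k : Nat) : Int) 1) m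
      have : PySem.Int.mod (a * PySem.List.pyGetD nums ((k : Nat) : Int) 1) m
          - b * PySem.List.pyGetD nums ((k : Nat) : Int) 1
          = (PySem.Int.mod (a * PySem.List.pyGetD nums ((k : Nat) : Int) 1) m
              - a * PySem.List.pyGetD nums ((k : Nat) : Int) 1)
            + PySem.List.pyGetD nums ((k : Nat) : Int) 1 * (a - b) := by ring
      rw [this]
      exact dvd_add h1 (Dvd.dvd.mul_left ih _)
    · rw [if_neg hik, if_neg hik]
      exact ih

theorem productExceptSelf_eq (nums : List Int) (m : Int) (hm : m ≠ 0) :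
    productExceptSelf nums m = productExceptSelf_alt nums m := by
  unfold productExceptSelf productExceptSelf_alt
  simp only [PySem.List.len_eq]
  congr 1
  -- characterize A's two arrays
  obtain ⟨plen, pinv⟩ := preLoop_getD nums m nums.length (le_refl _)
    ((PySem.List.pyRange 0 (nums.length : Int) 1).map (fun _ => (1 : Int))) _ rfl
    (by simp [PySem.List.length_pyRange_one])
    (by intro i hi
        have hlt : i < ((PySem.List.pyRange 0 (nums.length : Int) 1).map (fun _ => (1 : Int))).length := by
          simp [PySem.List.length_pyRange_one]; omega
        rw [List.getD_eq_getElem _ _ hlt]; simp)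
  have hsuf : ∀ i : Nat, i < nums.length →
      ((PySem.List.pyRange ((nums.length : Int) - 1) 0 (-1)).foldl
        (fun suf j => PySem.List.pySetD suf (j - 1)
          (PySem.Int.mod (PySem.List.pyGetD suf j 1 * PySem.List.pyGetD nums j 1) m))
        ((PySem.List.pyRange 0 (nums.length : Int) 1).map (fun _ => (1 : Int)))).getD i 1
      = gsuf m (nums.drop (i + 1)) := by
    rcases Nat.eq_zero_or_pos nums.length with h0 | hpos
    · intro i hi; omega
    · have : ((nums.length : Int) - 1) = ((nums.length - 1 : Nat) : Int) := by push_cast [hpos]; ring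
      rw [this]
      apply sufLoop_getD nums m (nums.length - 1) (by push_cast [hpos]; omega)
      · simp [PySem.List.length_pyRange_one]
      · intro i hi
        have harr : ((PySem.List.pyRange 0 (nums.length : Int) 1).map
            (fun _ => (1 : Int))).getD i 1 = 1 := by
          rcases Nat.lt_or_ge i ((PySem.List.pyRange 0 (nums.length : Int) 1).map
              (fun _ => (1 : Int))).length with h | h
          · rw [List.getD_eq_getElem _ _ h]; simp
          · rw [List.getD_eq_default _ _ h]
        rw [harr]
        by_cases h1 : nums.length - 1 ≤ i
        · have : i = nums.length - 1 := by omega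
          subst this
          rw [if_pos h1]
          have : nums.length - 1 + 1 = nums.length := by omega
          rw [this, List.drop_length, gsuf]
        · rw [if_neg h1]
  -- both totals as sums over the index range
  rw [PySem.List.foldl_add, PySem.List.foldl_add]
  simp only [zero_add]
  refine congrArg List.sum (List.map_congr_left ?_)
  intro i hi
  rw [PySem.List.mem_pyRange_one] at hi
  obtain ⟨hi0, hi1⟩ := hi
  have hin : i.toNat < nums.length := by omega
  rw [show i = ((i.toNat : Nat) : Int) by omega]
  simp only [PySem.List.pyGetD_natCast]
  have hpre := pinv i.toNat hin
  rw [if_pos (Or.inl hin)] at hpre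
  have hmodfold : PySem.Int.mod ((PySem.List.pyRange 0 (nums.length : Int) 1).foldl
      (fun p j => if j ≠ ((i.toNat : Nat) : Int) then PySem.Int.mod (p * PySem.List.pyGetD nums j 1) m else p) 1) m
      = PySem.Int.mod ((PySem.List.pyRange 0 (nums.length : Int) 1).foldl
      (fun p j => if j ≠ ((i.toNat : Nat) : Int) then p * PySem.List.pyGetD nums j 1 else p) 1) m :=
    pymod_congr hm (innerLoop_dvd nums m i.toNat nums.length)
  rw [hpre, hsuf i.toNat hin, hmodfold, innerLoop nums i.toNat nums.length (le_refl _),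
      if_neg (show ¬ nums.length ≤ i.toNat by omega)]
  have htk : ((nums.drop (i.toNat + 1)).take (nums.length - i.toNat - 1)) = nums.drop (i.toNat + 1) := by
    apply List.take_of_length_le
    simp only [List.length_drop]; omega
  rw [htk]
  apply pymod_congr hm
  have h1 := gpre_dvd m (nums.take i.toNat)
  have h2 := gsuf_dvd m (nums.drop (i.toNat + 1))
  have : gpre m (nums.take i.toNat) * gsuf m (nums.drop (i.toNat + 1))
      - (nums.take i.toNat).prod * (nums.drop (i.toNat + 1)).prod
      = gpre m (nums.take i.toNat) * (gsuf m (nums.drop (i.toNat + 1)) - (nums.drop (i.toNat + 1)).prod)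
        + (nums.drop (i.toNat + 1)).prod * (gpre m (nums.take i.toNat) - (nums.take i.toNat).prod) := by
    ring
  rw [this]
  exact dvd_add (Dvd.dvd.mul_left h2 _) (Dvd.dvd.mul_left h1 _)

-- ===== VERDICT (by name: the statement is the Claim_ definition above) =====
theorem productExceptSelf_spec : Claim_equal_productExceptSelf := by
  intro nums m _ hm
  unfold Spec_productExceptSelf
  exact productExceptSelf_eq nums m hm
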